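-- pv_equiv track=rewrite | github.com/gasparkoo/SubstitutionSolver | kan_strom_slov.py | kanonicky_tvar
-- ===== SOURCE A (Python) =====
-- def kanonicky_tvar(slovo):
--     slovo = slovo.lower()
--     slovnik = dict()
--     vysledne_slovo = ""
--     akt_pismeno = ord("a")
--     for i in slovo:
--         if i in slovnik:
--             vysledne_slovo += slovnik[i]
--         else:
--             slovnik[i] = chr(akt_pismeno)
--             akt_pismeno += 1
--             vysledne_slovo += slovnik[i]
--     return vysledne_slovo
-- ===== SOURCE B (Python) =====
-- def kanonicky_tvar(slovo):
--     s = list(slovo.lower())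
--     return "".join(chr(ord("a") + len(set(s[:s.index(c)]))) for c in s)
-- ===== Notes on version B (the rewrite author's own statement) =====
-- stated objective: alternative
-- what changed: A's stateful loop that lazily grows a char-to-letter dict behind a seen-before branch is replaced by a table-free closed form: each character independently maps to the lowercase letter whose alphabet offset is the number of distinct characters strictly before that character's first occurrence in the lowercased string, so no mapping structure is built or threaded at all.
import Mathlib
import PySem

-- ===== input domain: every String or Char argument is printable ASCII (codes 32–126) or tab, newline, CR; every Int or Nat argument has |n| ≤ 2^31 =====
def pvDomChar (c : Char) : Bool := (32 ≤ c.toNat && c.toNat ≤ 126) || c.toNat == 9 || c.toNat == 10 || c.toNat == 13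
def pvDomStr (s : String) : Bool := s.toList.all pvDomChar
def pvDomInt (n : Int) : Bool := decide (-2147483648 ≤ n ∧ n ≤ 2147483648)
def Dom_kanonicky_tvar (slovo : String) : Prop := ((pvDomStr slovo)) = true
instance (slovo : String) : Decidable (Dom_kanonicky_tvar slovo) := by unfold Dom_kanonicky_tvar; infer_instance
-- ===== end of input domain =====

-- B replaces A's lazy dict-building loop by a table-free closed form: each character maps to the
-- letter at alphabet offset = number of distinct characters before its first occurrence; alternative, not faster.


-- ===== PORT A =====
-- the 'for i in slovo' loop: state = (slovnik, vysledne_slovo as List Char, akt_pismeno);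
-- chr(k) on the codes reached here (97 .. 97+#distinct) is exactly Char.ofNat
def aLoop : List Char → PySem.Dict Char Char → List Char → Int → List Char
  | [], _, acc, _ => acc
  | c :: rest, d, acc, k =>
    match d.get? c with                     -- 'if i in slovnik' + the two lookups
    | some v => aLoop rest d (acc ++ [v]) k
    | none => aLoop rest (d.insert c (Char.ofNat k.toNat)) (acc ++ [Char.ofNat k.toNat]) (k + 1)

def kanonicky_tvar (slovo : String) : String :=
  String.ofList (aLoop (PySem.Chars.lower slovo.toList) PySem.Dict.empty [] 97)

-- ===== PORT B =====
-- s[:s.index(c)] is s.take (index? s c) (c is always in s, so the .getD 0 default is never used);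
-- len(set(...)) is (PySem.Set.ofList ...).length; the join over the generator is the map
def kanonicky_tvar_alt (slovo : String) : String :=
  let s := PySem.Chars.lower slovo.toList
  String.ofList (s.map (fun c =>
    Char.ofNat (97 + (PySem.Set.ofList (s.take ((PySem.List.index? s c).getD 0))).length)))

-- ===== PRECONDITION & SPEC =====
def Spec_kanonicky_tvar (slovo : String) (out : String) : Prop := out = kanonicky_tvar_alt slovo
instance (slovo : String) (out : String) : Decidable (Spec_kanonicky_tvar slovo out) := by unfold Spec_kanonicky_tvar; infer_instance

-- ===== CLAIM (what is proved, stated in full; the proofs are below) =====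
def Claim_equal_kanonicky_tvar : Prop := ∀ (slovo : String), Dom_kanonicky_tvar slovo → Spec_kanonicky_tvar slovo (kanonicky_tvar slovo)

-- ===== LEMMAS AND PROOFS =====

-- folding Set.add only ever appends: the start list is a prefix of the result
lemma foldl_add_prefix {α : Type} [BEq α] (l : List α) (s : List α) :
    ∃ t, l.foldl PySem.Set.add s = s ++ t := by
  induction l generalizing s with
  | nil => exact ⟨[], by simp⟩
  | cons c rest ih =>
    simp only [List.foldl_cons, PySem.Set.add]
    split
    · exact ih s
    · obtain ⟨t, ht⟩ := ih (s ++ [c])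
      exact ⟨c :: t, by rw [ht, List.append_assoc]; rfl⟩

-- a member of the start keeps its index through the fold
lemma index?_foldl_add {α : Type} [BEq α] [LawfulBEq α] (l s : List α) (c : α) (hc : c ∈ s) :
    PySem.List.index? (l.foldl PySem.Set.add s) c = PySem.List.index? s c := by
  obtain ⟨t, ht⟩ := foldl_add_prefix l s
  rw [ht, PySem.List.index?_append_of_mem t hc]

lemma dedup_append_cons (p : List Char) (c : Char) (rs : List Char) :
    PySem.List.dedup (p ++ c :: rs) = (c :: rs).foldl PySem.Set.add (PySem.List.dedup p) := by
  simp only [PySem.List.dedup, PySem.Set.ofList]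
  rw [List.foldl_append]

lemma dedup_append_singleton_mem (p : List Char) (c : Char) (hc : c ∈ PySem.List.dedup p) :
    PySem.List.dedup (p ++ [c]) = PySem.List.dedup p := by
  simp only [PySem.List.dedup, PySem.Set.ofList, PySem.Set.empty] at *
  rw [List.foldl_append]
  simp [PySem.Set.add, hc]

lemma dedup_append_singleton_not_mem (p : List Char) (c : Char) (hc : c ∉ PySem.List.dedup p) :
    PySem.List.dedup (p ++ [c]) = PySem.List.dedup p ++ [c] := by
  simp only [PySem.List.dedup, PySem.Set.ofList, PySem.Set.empty] at *
  rw [List.foldl_append]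
  simp [PySem.Set.add, hc]

-- main loop invariant: with the dict holding exactly the first-occurrence table of the
-- processed prefix p, the loop appends the canonical image of the rest
lemma aLoop_spec (rest : List Char) : ∀ (p acc : List Char) (d : PySem.Dict Char Char),
    (∀ c, d.get? c = (PySem.List.index? (PySem.List.dedup p) c).map (fun i => Char.ofNat (97 + i))) →
    aLoop rest d acc ((97 + (PySem.List.dedup p).length : Nat) : Int) =
      acc ++ rest.map (fun c =>
        Char.ofNat (97 + (PySem.List.index? (PySem.List.dedup (p ++ rest)) c).getD 0)) := by
  induction rest with
  | nil => intro p acc d _; simp [aLoop]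
  | cons c rs ih =>
    intro p acc d hd
    by_cases hc : c ∈ PySem.List.dedup p
    · -- seen before
      obtain ⟨i, hi⟩ := Option.isSome_iff_exists.mp ((PySem.List.index?_isSome_iff _ _).mpr hc)
      have hget : d.get? c = some (Char.ofNat (97 + i)) := by rw [hd, hi]; rfl
      have hp' := dedup_append_singleton_mem p c hc
      have hfc : PySem.List.index? (PySem.List.dedup (p ++ c :: rs)) c = some i := by
        rw [dedup_append_cons, index?_foldl_add _ _ _ hc, hi]
      have hstep := ih (p ++ [c]) (acc ++ [Char.ofNat (97 + i)]) d
        (by rw [hp']; exact hd)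
      rw [hp'] at hstep
      simp only [aLoop, hget]
      rw [hstep, List.append_assoc, ← List.append_cons, List.map_cons, hfc]
      rfl
    · -- new character
      have hget : d.get? c = none := by
        rw [hd, (PySem.List.index?_eq_none_iff _ _).mpr hc]; rfl
      have hp' := dedup_append_singleton_not_mem p c hc
      have htoNat : ((97 + (PySem.List.dedup p).length : Nat) : Int).toNat
          = 97 + (PySem.List.dedup p).length := by omega
      have hd' : ∀ x, (d.insert c (Char.ofNat (97 + (PySem.List.dedup p).length))).get? x =
          (PySem.List.index? (PySem.List.dedup (p ++ [c])) x).map (fun i => Char.ofNat (97 + i)) := by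
        intro x
        rw [hp', PySem.Dict.get?_insert]
        split
        · subst x
          rw [PySem.List.index?_append_singleton_self _ _ hc]; rfl
        · rename_i hx
          rw [hd x]
          by_cases hxm : x ∈ PySem.List.dedup p
          · rw [PySem.List.index?_append_of_mem _ hxm]
          · rw [(PySem.List.index?_eq_none_iff _ _).mpr hxm,
              (PySem.List.index?_eq_none_iff _ _).mpr ?_]
            intro hm
            rcases List.mem_append.mp hm with h1 | h1
            · exact hxm h1
            · exact hx (List.mem_singleton.mp h1)
      have hk : ((97 + (PySem.List.dedup p).length : Nat) : Int) + 1
          = ((97 + (PySem.List.dedup (p ++ [c])).length : Nat) : Int) := by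
        rw [hp']; simp; omega
      have hfc : PySem.List.index? (PySem.List.dedup (p ++ c :: rs)) c
          = some (PySem.List.dedup p).length := by
        rw [dedup_append_cons, List.foldl_cons]
        have hcp : c ∉ p := fun h => hc ((PySem.List.mem_dedup p c).mpr h)
        have hadd : PySem.Set.add (PySem.List.dedup p) c = PySem.List.dedup p ++ [c] := by
          simp [PySem.Set.add, hcp]
        rw [hadd, index?_foldl_add _ _ _ (List.mem_append.mpr (Or.inr (List.mem_singleton.mpr rfl))),
          PySem.List.index?_append_singleton_self _ _ hc]
      have hstep := ih (p ++ [c]) (acc ++ [Char.ofNat (97 + (PySem.List.dedup p).length)]) _ hd'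
      simp only [aLoop, hget, htoNat, hk] at *
      rw [hstep, List.append_assoc, ← List.append_cons, List.map_cons, hfc]
      rfl

-- the bridge to B's closed form: for c ∈ s, the index of c in the first-occurrence dedup of s
-- equals the number of distinct characters strictly before c's first occurrence in s
lemma index_dedup_eq_distinct_before (s : List Char) (c : Char) (hc : c ∈ s) :
    PySem.List.index? (PySem.List.dedup s) c
      = some (PySem.List.dedup (s.take ((PySem.List.index? s c).getD 0))).length := by
  obtain ⟨j, hj⟩ := Option.isSome_iff_exists.mp ((PySem.List.index?_isSome_iff _ _).mpr hc)
  obtain ⟨pre, suf, hs, hlen, hnp⟩ := (PySem.List.index?_eq_some_iff _ _ _).mp hj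
  have hcd : c ∉ PySem.List.dedup pre := fun h => hnp ((PySem.List.mem_dedup pre c).mp h)
  have htake : s.take ((PySem.List.index? s c).getD 0) = pre := by
    rw [hj]; simp only [Option.getD_some]
    rw [hs, ← hlen, List.take_left]
  rw [htake, hs, dedup_append_cons, List.foldl_cons]
  have hadd : PySem.Set.add (PySem.List.dedup pre) c = PySem.List.dedup pre ++ [c] := by
    simp [PySem.Set.add, hnp]
  rw [hadd, index?_foldl_add _ _ _ (List.mem_append.mpr (Or.inr (List.mem_singleton.mpr rfl))),
    PySem.List.index?_append_singleton_self _ _ hcd]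

-- ===== VERDICT (by name: the statement is the Claim_ definition above) =====
theorem kanonicky_tvar_spec : Claim_equal_kanonicky_tvar := by
  intro slovo _
  show kanonicky_tvar slovo = kanonicky_tvar_alt slovo
  unfold kanonicky_tvar kanonicky_tvar_alt
  have h := aLoop_spec (PySem.Chars.lower slovo.toList) [] [] PySem.Dict.empty
    (by intro c; simp [PySem.List.dedup, PySem.Set.ofList, PySem.Set.empty, PySem.List.index?])
  have h97 : ((97 + (PySem.List.dedup ([] : List Char)).length : Nat) : Int) = 97 := by
    simp [PySem.List.dedup, PySem.Set.ofList, PySem.Set.empty]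
  rw [h97] at h
  simp only [List.nil_append] at h
  rw [h]
  congr 1
  apply List.map_congr_left
  intro c hc
  rw [index_dedup_eq_distinct_before _ _ hc]
  simp [PySem.List.dedup]
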